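-- pv_equiv track=rewrite | github.com/jiachengqi/2019_IM_project_1 | god_class/evaluation/ground_truth.py | imp_gt
-- ===== SOURCE A (Python) =====
-- def match(n, k):
--     for a in k:
--         if a in n.lower():
--             return a
--     return "none"
--
-- def imp_gt(methods, keywords):
--     gt = {}
--     for m in methods:
--         k = match(m, keywords)
--
--         if k in gt:
--             gt[k] = gt[k] + [m]
--         else:
--             gt[k] = [m]
--
--     return gt
-- ===== SOURCE B (Python) =====
-- def imp_gt(methods, keywords):
--     # keyword-outer labelling over pre-lowered names: each pass claims still-unlabelled
--     # methods, then one method-order grouping pass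
--     lows = [m.lower() for m in methods]
--     label = [None for _ in methods]
--     for kw in keywords:
--         label = [kw if (l is None and kw in low) else l
--                  for l, low in zip(label, lows)]
--     gt = {}
--     for l, m in zip(label, methods):
--         gt.setdefault("none" if l is None else l, []).append(m)
--     return gt
-- ===== Notes on version B (the rewrite author's own statement) =====
-- stated objective: alternative
-- what changed: Inverts the traversal: B lowercases each method once and labels methods by folding keyword passes over a label list (keyword-outer) instead of A's per-method find-first scan with dict branching, then groups in one method-order pass with setdefault.
import Mathlib
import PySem

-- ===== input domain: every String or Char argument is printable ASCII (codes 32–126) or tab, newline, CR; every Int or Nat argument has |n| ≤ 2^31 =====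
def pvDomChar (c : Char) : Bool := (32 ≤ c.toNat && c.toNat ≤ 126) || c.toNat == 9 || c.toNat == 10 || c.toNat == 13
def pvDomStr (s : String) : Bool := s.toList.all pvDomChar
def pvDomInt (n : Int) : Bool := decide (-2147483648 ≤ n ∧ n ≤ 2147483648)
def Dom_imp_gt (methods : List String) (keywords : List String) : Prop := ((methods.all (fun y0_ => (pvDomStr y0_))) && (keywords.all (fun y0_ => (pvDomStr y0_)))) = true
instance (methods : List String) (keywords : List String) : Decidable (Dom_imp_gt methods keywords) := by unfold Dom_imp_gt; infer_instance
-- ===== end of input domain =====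

-- B replaces A's per-method find-first scan with keyword-outer labelling passes over once-lowered names, then one grouping pass; objective: alternative decomposition.

-- ===== PORT A =====
-- helper `match(n, k)`: first keyword contained in n.lower(), else "none"
def pvMatchA (n : String) (k : List String) : String :=
  match k with
  | [] => "none"
  | a :: rest => if PySem.Str.isIn a (PySem.Str.lower n) then a else pvMatchA n rest

def imp_gt (methods : List String) (keywords : List String) : List (String × List String) :=
  (methods.foldl (fun gt m =>
    let k := pvMatchA m keywords
    if (PySem.Dict.get? gt k).isSome then
      PySem.Dict.insert gt k ((PySem.Dict.getD gt k []) ++ [m])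
    else
      PySem.Dict.insert gt k [m]) (PySem.Dict.empty : PySem.Dict String (List String))).items

-- ===== PORT B =====
def imp_gt_alt (methods : List String) (keywords : List String) : List (String × List String) :=
  let lows := methods.map (fun m => PySem.Str.lower m)
  let label0 : List (Option String) := methods.map (fun _ => none)
  let label := keywords.foldl (fun label kw =>
    (label.zip lows).map (fun p =>
      if p.1 = none ∧ PySem.Str.isIn kw p.2 then some kw else p.1)) label0
  ((label.zip methods).foldl (fun gt p =>
    let k := match p.1 with | none => "none" | some s => s
    -- setdefault(k, []).append(m): in-place append, key position unchanged
    PySem.Dict.insert gt k ((PySem.Dict.getD gt k []) ++ [p.2]))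
    (PySem.Dict.empty : PySem.Dict String (List String))).items

-- ===== PRECONDITION & SPEC =====
def Spec_imp_gt (methods : List String) (keywords : List String) (out : List (String × List String)) : Prop := out = imp_gt_alt methods keywords
instance (methods : List String) (keywords : List String) (out : List (String × List String)) : Decidable (Spec_imp_gt methods keywords out) := by unfold Spec_imp_gt; infer_instance

-- ===== CLAIM (what is proved, stated in full; the proofs are below) =====
def Claim_equal_imp_gt : Prop := ∀ (methods : List String) (keywords : List String), Dom_imp_gt methods keywords → Spec_imp_gt methods keywords (imp_gt methods keywords)

-- ===== LEMMAS AND PROOFS =====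

-- one labelling pass on a mapped label list is a map over methods
theorem pv_pass_map (ms : List String) (g : String → Option String) (kw : String) :
    ((ms.map g).zip (ms.map (fun m => PySem.Str.lower m))).map (fun p =>
      if p.1 = none ∧ PySem.Str.isIn kw p.2 then some kw else p.1)
    = ms.map (fun m => if g m = none ∧ PySem.Str.isIn kw (PySem.Str.lower m) then some kw else g m) := by
  induction ms with
  | nil => rfl
  | cons m ms ih => simp only [List.map_cons, List.zip_cons_cons, ih]

-- the whole labelling fold, starting from any mapped list, is a map
theorem pv_label_map (ks : List String) (ms : List String) (g : String → Option String) :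
    ks.foldl (fun label kw =>
      (label.zip (ms.map (fun m => PySem.Str.lower m))).map (fun p =>
        if p.1 = none ∧ PySem.Str.isIn kw p.2 then some kw else p.1)) (ms.map g)
    = ms.map (fun m => ks.foldl (fun o kw =>
        if o = none ∧ PySem.Str.isIn kw (PySem.Str.lower m) then some kw else o) (g m)) := by
  induction ks generalizing g with
  | nil => rfl
  | cons kw ks ih =>
      simp only [List.foldl_cons, pv_pass_map]
      exact ih _

-- zipping a mapped copy of a list with the list itself pairs each element with its image
theorem pv_zip_map {α β : Type} (ms : List α) (f : α → β) :
    (ms.map f).zip ms = ms.map (fun m => (f m, m)) := by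
  induction ms with
  | nil => rfl
  | cons m ms ih => simp [ih]

-- a some accumulator is fixed by the first-match fold
theorem pv_fold_some (ks : List String) (m : String) (s : String) :
    ks.foldl (fun o kw => if o = none ∧ PySem.Str.isIn kw (PySem.Str.lower m) then some kw else o)
      (some s) = some s := by
  induction ks with
  | nil => rfl
  | cons kw ks ih => simpa using ih

-- the first-match fold computes A's match helper
theorem pv_fold_match (ks : List String) (m : String) :
    (match ks.foldl (fun o kw => if o = none ∧ PySem.Str.isIn kw (PySem.Str.lower m) then some kw else o)
        none with | none => "none" | some s => s) = pvMatchA m ks := by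
  induction ks with
  | nil => rfl
  | cons kw ks ih =>
      simp only [List.foldl_cons, pvMatchA]
      by_cases h : PySem.Str.isIn kw (PySem.Str.lower m)
      · rw [if_pos ⟨trivial, h⟩, pv_fold_some, if_pos h]
      · rw [if_neg (fun hc => h hc.2), if_neg h]
        exact ih

-- A's branching insert equals B's setdefault-style insert
theorem pv_step_eq (gt : PySem.Dict String (List String)) (k : String) (m : String) :
    (if (PySem.Dict.get? gt k).isSome then
      PySem.Dict.insert gt k ((PySem.Dict.getD gt k []) ++ [m])
    else
      PySem.Dict.insert gt k [m])
    = PySem.Dict.insert gt k ((PySem.Dict.getD gt k []) ++ [m]) := by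
  by_cases h : (PySem.Dict.get? gt k).isSome
  · simp [h]
  · have hg : PySem.Dict.get? gt k = none := by
      cases hgk : PySem.Dict.get? gt k with
      | none => rfl
      | some v => simp [hgk] at h
    simp [PySem.Dict.getD, hg]

-- ===== VERDICT (by name: the statement is the Claim_ definition above) =====
theorem imp_gt_spec : Claim_equal_imp_gt := by
  intro methods keywords _
  unfold Spec_imp_gt
  simp only [imp_gt, imp_gt_alt]
  rw [pv_label_map]
  congr 1
  rw [pv_zip_map, List.foldl_map]
  induction methods using List.reverseRecOn with
  | nil => rfl
  | append_singleton ms m ih =>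
      simp only [List.foldl_append, List.foldl_cons, List.foldl_nil, pv_step_eq,
        pv_fold_match]
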